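-- pv_equiv track=rewrite | github.com/maher460/figphrase | figpro/evaluation/explore.py | parse_input_dumpstring
-- ===== SOURCE A (Python) =====
-- def parse_input_dumpstring(line):
--     sent = line.strip().split()
--     target_pos = None
--     for i, word in enumerate(sent):
--         if word.find('dumpstring') >= 0:
--             target_pos = i
--             word = None
--     return sent, target_pos
-- ===== SOURCE B (Python) =====
-- def parse_input_dumpstring(line):
--     sent = line.strip().split()
--     for i, word in reversed(list(enumerate(sent))):
--         if 'dumpstring' in word:
--             return sent, i
--     return sent, None
-- ===== Notes on version B (the rewrite author's own statement) =====
-- stated objective: alternative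
-- what changed: B scans the word list backward and returns at the first match (early exit), instead of A's full forward sweep that keeps overwriting target_pos at every match.
import Mathlib
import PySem

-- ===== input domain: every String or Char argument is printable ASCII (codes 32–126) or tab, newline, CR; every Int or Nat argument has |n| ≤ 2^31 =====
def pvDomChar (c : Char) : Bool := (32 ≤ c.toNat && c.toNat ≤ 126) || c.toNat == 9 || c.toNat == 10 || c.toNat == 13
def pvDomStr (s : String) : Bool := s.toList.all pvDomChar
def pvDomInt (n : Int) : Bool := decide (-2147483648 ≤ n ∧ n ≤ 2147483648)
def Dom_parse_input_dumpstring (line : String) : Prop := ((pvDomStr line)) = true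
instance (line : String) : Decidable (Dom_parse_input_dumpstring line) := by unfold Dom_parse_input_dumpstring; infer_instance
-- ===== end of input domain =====

-- B scans the word list backward and returns at the first match (early exit),
-- instead of A's full forward sweep that keeps overwriting target_pos.

-- ===== PORT A =====
def parse_input_dumpstring (line : String) : List String × Option Int :=
  let sent := PySem.Str.split₀ (PySem.Str.strip line)
  let target_pos : Option Int :=
    (PySem.List.enumerate sent).foldl
      (fun acc iw => if 0 ≤ PySem.Str.find iw.2 "dumpstring" then some iw.1 else acc)
      none
  (sent, target_pos)

-- ===== PORT B =====
def pvFindBack (l : List (Int × String)) : Option Int :=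
  match l with
  | [] => none
  | (i, w) :: rest => if PySem.Str.isIn "dumpstring" w then some i else pvFindBack rest

def parse_input_dumpstring_alt (line : String) : List String × Option Int :=
  let sent := PySem.Str.split₀ (PySem.Str.strip line)
  (sent, pvFindBack (PySem.List.enumerate sent).reverse)

-- ===== PRECONDITION & SPEC =====
def Spec_parse_input_dumpstring (line : String) (out : List String × Option Int) : Prop := out = parse_input_dumpstring_alt line
instance (line : String) (out : List String × Option Int) : Decidable (Spec_parse_input_dumpstring line out) := by unfold Spec_parse_input_dumpstring; infer_instance

-- ===== CLAIM (what is proved, stated in full; the proofs are below) =====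
def Claim_equal_parse_input_dumpstring : Prop := ∀ (line : String), Dom_parse_input_dumpstring line → Spec_parse_input_dumpstring line (parse_input_dumpstring line)

-- ===== LEMMAS AND PROOFS =====

-- B's scan distributes over append: a match in the front part wins.
theorem pvFindBack_append (l1 l2 : List (Int × String)) :
    pvFindBack (l1 ++ l2) = match pvFindBack l1 with
      | some i => some i
      | none => pvFindBack l2 := by
  induction l1 with
  | nil => simp only [List.nil_append, pvFindBack]
  | cons hd tl ih =>
      obtain ⟨i, w⟩ := hd
      simp only [List.cons_append, pvFindBack]
      by_cases h : PySem.Str.isIn "dumpstring" w = true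
      · rw [if_pos h, if_pos h]
      · rw [if_neg h, if_neg h, ih]

-- A's overwriting foldl equals B's first-match scan of the reversed list.
theorem pvFoldl_eq_findBack (l : List (Int × String)) (acc : Option Int) :
    l.foldl (fun acc iw => if 0 ≤ PySem.Str.find iw.2 "dumpstring" then some iw.1 else acc) acc
      = match pvFindBack l.reverse with
        | some i => some i
        | none => acc := by
  induction l generalizing acc with
  | nil => simp only [List.foldl_nil, List.reverse_nil, pvFindBack]
  | cons hd tl ih =>
      obtain ⟨i, w⟩ := hd
      have hiff : (0 ≤ PySem.Str.find w "dumpstring") ↔ PySem.Str.isIn "dumpstring" w = true := by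
        rw [PySem.Str.find_nonneg_iff, PySem.Str.isIn_iff_infix]
      simp only [List.foldl_cons, List.reverse_cons]
      rw [ih, pvFindBack_append]
      by_cases h : PySem.Str.isIn "dumpstring" w = true
      · rw [if_pos (hiff.mpr h)]
        cases pvFindBack tl.reverse <;> simp only [pvFindBack, if_pos h]
      · rw [if_neg (fun hc => h (hiff.mp hc))]
        cases pvFindBack tl.reverse <;> simp only [pvFindBack, if_neg h]

-- ===== VERDICT (by name: the statement is the Claim_ definition above) =====
theorem parse_input_dumpstring_spec : Claim_equal_parse_input_dumpstring := by
  intro line _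
  unfold Spec_parse_input_dumpstring parse_input_dumpstring parse_input_dumpstring_alt
  simp only
  rw [pvFoldl_eq_findBack]
  cases pvFindBack (PySem.List.enumerate (PySem.Str.split₀ (PySem.Str.strip line))).reverse <;> rfl
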